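-- pv_equiv track=rewrite | github.com/shivrajjavalkote/Unix_File_System_Project | Floder3/app3.py | calculate_blocks
-- ===== SOURCE A (Python) =====
-- BLOCK_SIZE = 1024  # Block size in bytes
--
-- POINTER_SIZE = 4  # Size of a pointer in bytes
--
-- NUM_DIRECT_BLOCKS = 10  # Number of direct blocks
--
-- SINGLE_INDIRECT_CAPACITY = (BLOCK_SIZE // POINTER_SIZE) * BLOCK_SIZE  # Capacity of single indirect
--
-- DOUBLE_INDIRECT_CAPACITY = (BLOCK_SIZE // POINTER_SIZE) * SINGLE_INDIRECT_CAPACITY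
--
-- def calculate_blocks(file_size):
--     allocation = {
--         "direct_blocks": [],
--         "single_indirect": [],
--         "double_indirect": [],
--         "triple_indirect": []
--     }
--
--     # Calculate total number of data blocks required
--     total_blocks = (file_size + BLOCK_SIZE - 1) // BLOCK_SIZE  # Round up
--
--     # Allocate direct blocks
--     for i in range(min(NUM_DIRECT_BLOCKS, total_blocks)):
--         allocation["direct_blocks"].append(f"Direct Block {i}")
--     total_blocks -= min(NUM_DIRECT_BLOCKS, total_blocks)
--
--     # Allocate single indirect blocks
--     if total_blocks > 0:
--         single_blocks = min(SINGLE_INDIRECT_CAPACITY // BLOCK_SIZE, total_blocks)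
--         allocation["single_indirect"].extend([f"Block {i}" for i in range(single_blocks)])
--         total_blocks -= single_blocks
--
--     # Allocate double indirect blocks
--     if total_blocks > 0:
--         double_blocks = min(DOUBLE_INDIRECT_CAPACITY // BLOCK_SIZE, total_blocks)
--         for i in range(double_blocks):
--             double_index = i // (BLOCK_SIZE // POINTER_SIZE)  # Which double indirect block
--             single_index = i % (BLOCK_SIZE // POINTER_SIZE)  # Which single indirect block within
--             allocation["double_indirect"].append(
--                 f"Double Block {double_index}, Single Block {single_index}"
--             )
--         total_blocks -= double_blocks
--
--     # Allocate triple indirect blocks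
--     if total_blocks > 0:
--         triple_blocks = total_blocks
--         for i in range(triple_blocks):
--             level1 = i // ((BLOCK_SIZE // POINTER_SIZE) ** 2)
--             level2 = (i // (BLOCK_SIZE // POINTER_SIZE)) % (BLOCK_SIZE // POINTER_SIZE)
--             level3 = i % (BLOCK_SIZE // POINTER_SIZE)
--             allocation["triple_indirect"].append(f"L1 {level1}, L2 {level2}, L3 {level3}")
--
--     return allocation
-- ===== SOURCE B (Python) =====
-- BLOCK_SIZE = 1024
-- POINTER_SIZE = 4
-- NUM_DIRECT_BLOCKS = 10
-- N = BLOCK_SIZE // POINTER_SIZE  # pointers per block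
--
-- def calculate_blocks(file_size):
--     total = (file_size + BLOCK_SIZE - 1) // BLOCK_SIZE
--     d = max(0, min(NUM_DIRECT_BLOCKS, total))
--     s = max(0, min(N, total - NUM_DIRECT_BLOCKS))
--     db = max(0, min(N * N, total - NUM_DIRECT_BLOCKS - N))
--     t = max(0, total - NUM_DIRECT_BLOCKS - N - N * N)
--
--     double = []
--     for row in range(db // N):
--         for col in range(N):
--             double.append(f"Double Block {row}, Single Block {col}")
--     for col in range(db % N):
--         double.append(f"Double Block {db // N}, Single Block {col}")
--
--     triple = []
--     full_planes = t // (N * N)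
--     rem = t % (N * N)
--     for l1 in range(full_planes):
--         for l2 in range(N):
--             for l3 in range(N):
--                 triple.append(f"L1 {l1}, L2 {l2}, L3 {l3}")
--     for l2 in range(rem // N):
--         for l3 in range(N):
--             triple.append(f"L1 {full_planes}, L2 {l2}, L3 {l3}")
--     for l3 in range(rem % N):
--         triple.append(f"L1 {full_planes}, L2 {rem // N}, L3 {l3}")
--
--     return {
--         "direct_blocks": [f"Direct Block {i}" for i in range(d)],
--         "single_indirect": [f"Block {i}" for i in range(s)],
--         "double_indirect": double,
--         "triple_indirect": triple,
--     }
-- ===== Notes on version B (the rewrite author's own statement) =====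
-- stated objective: alternative
-- what changed: A threads one mutable total through sequential subtract-and-branch sections and derives each double/triple entry from a flat index by divmod; B computes the four block counts directly as closed-form clamps of the total and emits the double/triple sections with nested row/plane loops over explicit indices, so no divmod per entry is needed.
import Mathlib
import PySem

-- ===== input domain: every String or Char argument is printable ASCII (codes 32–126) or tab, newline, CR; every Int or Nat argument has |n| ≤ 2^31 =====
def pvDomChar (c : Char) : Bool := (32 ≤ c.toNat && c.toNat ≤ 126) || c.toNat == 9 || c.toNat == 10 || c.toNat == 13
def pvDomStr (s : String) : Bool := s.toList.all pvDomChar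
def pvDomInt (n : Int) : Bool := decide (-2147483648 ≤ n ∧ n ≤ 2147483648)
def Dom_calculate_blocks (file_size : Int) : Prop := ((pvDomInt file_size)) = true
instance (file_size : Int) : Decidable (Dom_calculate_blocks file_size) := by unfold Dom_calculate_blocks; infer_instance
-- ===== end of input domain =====

set_option maxRecDepth 8000


-- B replaces A's sequential subtract-as-you-go bookkeeping by closed-form clamped counts and the
-- flat divmod loops of the double/triple sections by nested row/plane loops (objective: alternative
-- decomposition, same cost). Equivalence of the return value is proved for every file_size in Dom.

-- ===== PORT A =====
-- module constants of Source A
def pvBLOCK_SIZE : Int := 1024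
def pvPOINTER_SIZE : Int := 4
def pvNUM_DIRECT_BLOCKS : Int := 10
def pvSINGLE_INDIRECT_CAPACITY : Int := (PySem.Int.floordiv pvBLOCK_SIZE pvPOINTER_SIZE) * pvBLOCK_SIZE
def pvDOUBLE_INDIRECT_CAPACITY : Int := (PySem.Int.floordiv pvBLOCK_SIZE pvPOINTER_SIZE) * pvSINGLE_INDIRECT_CAPACITY

def calculate_blocks (file_size : Int) : List (String × List String) :=
  let total0 := PySem.Int.floordiv (file_size + pvBLOCK_SIZE - 1) pvBLOCK_SIZE
  let direct := (PySem.List.pyRange 0 (min pvNUM_DIRECT_BLOCKS total0) 1).map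
      (fun i => "Direct Block " ++ PySem.Int.toStr i)
  let total1 := total0 - min pvNUM_DIRECT_BLOCKS total0
  let single := if total1 > 0 then
      (PySem.List.pyRange 0 (min (PySem.Int.floordiv pvSINGLE_INDIRECT_CAPACITY pvBLOCK_SIZE) total1) 1).map
        (fun i => "Block " ++ PySem.Int.toStr i)
    else []
  let total2 := if total1 > 0 then
      total1 - min (PySem.Int.floordiv pvSINGLE_INDIRECT_CAPACITY pvBLOCK_SIZE) total1 else total1
  let double := if total2 > 0 then
      (PySem.List.pyRange 0 (min (PySem.Int.floordiv pvDOUBLE_INDIRECT_CAPACITY pvBLOCK_SIZE) total2) 1).map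
        (fun i => "Double Block " ++ PySem.Int.toStr (PySem.Int.floordiv i (PySem.Int.floordiv pvBLOCK_SIZE pvPOINTER_SIZE))
          ++ ", Single Block " ++ PySem.Int.toStr (PySem.Int.mod i (PySem.Int.floordiv pvBLOCK_SIZE pvPOINTER_SIZE)))
    else []
  let total3 := if total2 > 0 then
      total2 - min (PySem.Int.floordiv pvDOUBLE_INDIRECT_CAPACITY pvBLOCK_SIZE) total2 else total2
  let triple := if total3 > 0 then
      (PySem.List.pyRange 0 total3 1).map
        (fun i => "L1 " ++ PySem.Int.toStr (PySem.Int.floordiv i ((PySem.Int.floordiv pvBLOCK_SIZE pvPOINTER_SIZE) ^ 2))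
          ++ ", L2 " ++ PySem.Int.toStr (PySem.Int.mod (PySem.Int.floordiv i (PySem.Int.floordiv pvBLOCK_SIZE pvPOINTER_SIZE)) (PySem.Int.floordiv pvBLOCK_SIZE pvPOINTER_SIZE))
          ++ ", L3 " ++ PySem.Int.toStr (PySem.Int.mod i (PySem.Int.floordiv pvBLOCK_SIZE pvPOINTER_SIZE)))
    else []
  [("direct_blocks", direct), ("single_indirect", single),
   ("double_indirect", double), ("triple_indirect", triple)]

-- ===== PORT B =====
-- Source B module constant N = BLOCK_SIZE // POINTER_SIZE
def pvN : Int := PySem.Int.floordiv pvBLOCK_SIZE pvPOINTER_SIZE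

def pvTriLine (l1 l2 l3 : Int) : String :=
  "L1 " ++ PySem.Int.toStr l1 ++ ", L2 " ++ PySem.Int.toStr l2 ++ ", L3 " ++ PySem.Int.toStr l3

def calculate_blocks_alt (file_size : Int) : List (String × List String) :=
  let total := PySem.Int.floordiv (file_size + pvBLOCK_SIZE - 1) pvBLOCK_SIZE
  let d := max 0 (min pvNUM_DIRECT_BLOCKS total)
  let s := max 0 (min pvN (total - pvNUM_DIRECT_BLOCKS))
  let db := max 0 (min (pvN * pvN) (total - pvNUM_DIRECT_BLOCKS - pvN))
  let t := max 0 (total - pvNUM_DIRECT_BLOCKS - pvN - pvN * pvN)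
  let double :=
    (PySem.List.pyRange 0 (PySem.Int.floordiv db pvN) 1).flatMap (fun row =>
      (PySem.List.pyRange 0 pvN 1).map (fun col =>
        "Double Block " ++ PySem.Int.toStr row ++ ", Single Block " ++ PySem.Int.toStr col))
    ++ (PySem.List.pyRange 0 (PySem.Int.mod db pvN) 1).map (fun col =>
        "Double Block " ++ PySem.Int.toStr (PySem.Int.floordiv db pvN) ++ ", Single Block " ++ PySem.Int.toStr col)
  let full_planes := PySem.Int.floordiv t (pvN * pvN)
  let rem := PySem.Int.mod t (pvN * pvN)
  let triple :=
    (PySem.List.pyRange 0 full_planes 1).flatMap (fun l1 =>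
      (PySem.List.pyRange 0 pvN 1).flatMap (fun l2 =>
        (PySem.List.pyRange 0 pvN 1).map (fun l3 => pvTriLine l1 l2 l3)))
    ++ ((PySem.List.pyRange 0 (PySem.Int.floordiv rem pvN) 1).flatMap (fun l2 =>
        (PySem.List.pyRange 0 pvN 1).map (fun l3 => pvTriLine full_planes l2 l3))
    ++ (PySem.List.pyRange 0 (PySem.Int.mod rem pvN) 1).map (fun l3 =>
        pvTriLine full_planes (PySem.Int.floordiv rem pvN) l3))
  [("direct_blocks", (PySem.List.pyRange 0 d 1).map (fun i => "Direct Block " ++ PySem.Int.toStr i)),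
   ("single_indirect", (PySem.List.pyRange 0 s 1).map (fun i => "Block " ++ PySem.Int.toStr i)),
   ("double_indirect", double), ("triple_indirect", triple)]

-- ===== PRECONDITION & SPEC =====
def Spec_calculate_blocks (file_size : Int) (out : List (String × List String)) : Prop := out = calculate_blocks_alt file_size
instance (file_size : Int) (out : List (String × List String)) : Decidable (Spec_calculate_blocks file_size out) := by unfold Spec_calculate_blocks; infer_instance

-- ===== CLAIM (what is proved, stated in full; the proofs are below) =====
def Claim_equal_calculate_blocks : Prop := ∀ (file_size : Int), Dom_calculate_blocks file_size → Spec_calculate_blocks file_size (calculate_blocks file_size)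

-- ===== LEMMAS AND PROOFS =====

theorem pvPyRangeZero (n : Int) :
    PySem.List.pyRange 0 n 1 = (List.range n.toNat).map (Nat.cast : Nat → Int) := by
  rw [PySem.List.pyRange_one]
  simp only [sub_zero]
  exact List.map_congr_left (fun i _ => by simp)

-- the one structural fact: a flat loop over q*N+r indices, reading each index by divmod N,
-- equals q full rows of N plus a partial row of r
theorem pvFlatEqNested {α : Type} (N : Nat) (hN : 0 < N) :
    ∀ (q : Nat) (g : Nat → Nat → α) (r : Nat), r ≤ N →
    (List.range (q*N+r)).map (fun i => g (i/N) (i%N)) =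
      (List.range q).flatMap (fun a => (List.range N).map (g a)) ++ (List.range r).map (g q) := by
  intro q
  induction q with
  | zero =>
    intro g r hr
    simp only [Nat.zero_mul, Nat.zero_add, List.range_zero, List.flatMap_nil, List.nil_append]
    exact List.map_congr_left (fun i hi => by
      rw [List.mem_range] at hi
      rw [Nat.div_eq_of_lt (lt_of_lt_of_le hi hr), Nat.mod_eq_of_lt (lt_of_lt_of_le hi hr)])
  | succ q ih =>
    intro g r hr
    have hsz : (q+1)*N + r = N + (q*N + r) := by ring
    rw [hsz, List.range_add, List.map_append, List.map_map]
    have h1 : (List.range (q*N+r)).map ((fun i => g (i/N) (i%N)) ∘ (N + ·)) =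
        (List.range (q*N+r)).map (fun j => (fun a b => g (a+1) b) (j/N) (j%N)) :=
      List.map_congr_left (fun j _ => by
        simp only [Function.comp]
        rw [Nat.add_comm N j, Nat.add_div_right _ hN, Nat.add_mod_right])
    have h0 : (List.range N).map (fun i => g (i/N) (i%N)) = (List.range N).map (g 0) :=
      List.map_congr_left (fun i hi => by
        rw [List.mem_range] at hi
        rw [Nat.div_eq_of_lt hi, Nat.mod_eq_of_lt hi])
    rw [h1, h0, ih (fun a b => g (a+1) b) r hr]
    have h2 : List.range (q+1) = 0 :: (List.range q).map (·+1) := by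
      rw [List.range_succ_eq_map]
    rw [h2, List.flatMap_cons, List.flatMap_map, List.append_assoc]


theorem pvFd256 (k : Nat) : PySem.Int.floordiv (k : Int) 256 = ((k/256 : Nat) : Int) := by simp [pysem]

theorem pvMod256 (k : Nat) : PySem.Int.mod (k : Int) 256 = ((k%256 : Nat) : Int) := by simp [pysem]


theorem pvFd65536 (k : Nat) : PySem.Int.floordiv (k : Int) 65536 = ((k/65536 : Nat) : Int) := by simp [pysem]

theorem pvMod65536 (k : Nat) : PySem.Int.mod (k : Int) 65536 = ((k%65536 : Nat) : Int) := by simp [pysem]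


def pvGD (a b : Nat) : String :=
  "Double Block " ++ PySem.Int.toStr a ++ ", Single Block " ++ PySem.Int.toStr b

theorem pvGDcore (m : Nat) :
    (List.range m).map (fun k => pvGD (k/256) (k%256)) =
      (List.range (m/256)).flatMap (fun a => (List.range 256).map (pvGD a))
        ++ (List.range (m%256)).map (pvGD (m/256)) := by
  have h := pvFlatEqNested 256 (by norm_num) (m/256) pvGD (m%256)
      (le_of_lt (Nat.mod_lt _ (by norm_num)))
  rw [show m/256*256+m%256 = m by omega] at h
  exact h


def pvGT (a b c : Nat) : String := pvTriLine a b c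

theorem pvGTcore (m : Nat) :
    (List.range m).map (fun i => pvGT (i/65536) (i/256%256) (i%256)) =
      (List.range (m/65536)).flatMap (fun a => (List.range 256).flatMap (fun b => (List.range 256).map (pvGT a b)))
      ++ ((List.range (m%65536/256)).flatMap (fun b => (List.range 256).map (pvGT (m/65536) b))
      ++ (List.range (m%65536%256)).map (pvGT (m/65536) (m%65536/256))) := by
  have hstep1 : (List.range m).map (fun i => pvGT (i/65536) (i/256%256) (i%256)) =
      (List.range m).map (fun i => (fun a j => pvGT a (j/256) (j%256)) (i/65536) (i%65536)) :=
    List.map_congr_left (fun i _ => by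
      rw [show i/256%256 = i%65536/256 by omega, show i%256 = i%65536%256 by omega])
  have h2 := pvFlatEqNested 65536 (by norm_num) (m/65536) (fun a j => pvGT a (j/256) (j%256)) (m%65536)
      (le_of_lt (Nat.mod_lt _ (by norm_num)))
  rw [show m/65536*65536+m%65536 = m by omega] at h2
  have hplane : (fun a => (List.range 65536).map (fun j => pvGT a (j/256) (j%256))) =
      (fun a => (List.range 256).flatMap (fun b => (List.range 256).map (pvGT a b))) := by
    funext a
    have h3 := pvFlatEqNested 256 (by norm_num) 256 (pvGT a) 0 (by norm_num)
    simp only [Nat.add_zero, List.range_zero, List.map_nil, List.append_nil] at h3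
    rw [show (256*256 : Nat) = 65536 by norm_num] at h3
    exact h3
  have h4 := pvFlatEqNested 256 (by norm_num) (m%65536/256) (pvGT (m/65536)) (m%65536%256)
      (le_of_lt (Nat.mod_lt _ (by norm_num)))
  rw [show m%65536/256*256+m%65536%256 = m%65536 by omega] at h4
  rw [hstep1, h2, h4, hplane]


theorem pvDirect (T : Int) :
    (PySem.List.pyRange 0 (min 10 T) 1).map (fun i => "Direct Block " ++ PySem.Int.toStr i) =
    (PySem.List.pyRange 0 (max 0 (min 10 T)) 1).map (fun i => "Direct Block " ++ PySem.Int.toStr i) := by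
  rw [pvPyRangeZero, pvPyRangeZero, show (min 10 T).toNat = (max 0 (min 10 T)).toNat by omega]

theorem pvSingle (T : Int) :
    (if T - min 10 T > 0 then (PySem.List.pyRange 0 (min 256 (T - min 10 T)) 1).map (fun i => "Block " ++ PySem.Int.toStr i) else []) =
    (PySem.List.pyRange 0 (max 0 (min 256 (T - 10))) 1).map (fun i => "Block " ++ PySem.Int.toStr i) := by
  by_cases h : T - min 10 T > 0
  · rw [if_pos h, pvPyRangeZero, pvPyRangeZero,
        show (min 256 (T - min 10 T)).toNat = (max 0 (min 256 (T - 10))).toNat by omega]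
  · rw [if_neg h, pvPyRangeZero, show (max 0 (min 256 (T - 10))).toNat = 0 by omega]
    simp

theorem pvDouble (T : Int) :
    (if (if T - min 10 T > 0 then T - min 10 T - min 256 (T - min 10 T) else T - min 10 T) > 0 then
      (PySem.List.pyRange 0 (min 65536 (if T - min 10 T > 0 then T - min 10 T - min 256 (T - min 10 T) else T - min 10 T)) 1).map
        (fun i => "Double Block " ++ PySem.Int.toStr (PySem.Int.floordiv i 256)
          ++ ", Single Block " ++ PySem.Int.toStr (PySem.Int.mod i 256))
     else []) =
    ((PySem.List.pyRange 0 (PySem.Int.floordiv (max 0 (min 65536 (T - 10 - 256))) 256) 1).flatMap (fun row =>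
        (PySem.List.pyRange 0 256 1).map (fun col =>
          "Double Block " ++ PySem.Int.toStr row ++ ", Single Block " ++ PySem.Int.toStr col))
      ++ (PySem.List.pyRange 0 (PySem.Int.mod (max 0 (min 65536 (T - 10 - 256))) 256) 1).map (fun col =>
          "Double Block " ++ PySem.Int.toStr (PySem.Int.floordiv (max 0 (min 65536 (T - 10 - 256))) 256)
            ++ ", Single Block " ++ PySem.Int.toStr col)) := by
  set t2 := (if T - min 10 T > 0 then T - min 10 T - min 256 (T - min 10 T) else T - min 10 T) with ht2
  set db := max 0 (min 65536 (T - 10 - 256)) with hdb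
  by_cases h : t2 > 0
  · rw [if_pos h]
    have hdbv : db = min 65536 t2 := by
      rw [hdb]; rw [ht2] at h ⊢
      by_cases hc : T - min 10 T > 0
      · rw [if_pos hc] at h ⊢; omega
      · rw [if_neg hc] at h ⊢; omega
    have hm : db = ((db.toNat : Nat) : Int) := by omega
    set m := db.toNat with hmdef
    rw [← hdbv, hm, pvFd256, pvMod256, pvPyRangeZero, pvPyRangeZero, pvPyRangeZero, pvPyRangeZero,
        List.map_map, List.flatMap_map, List.map_map]
    have hfun : (fun i => "Double Block " ++ PySem.Int.toStr (PySem.Int.floordiv i 256)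
          ++ ", Single Block " ++ PySem.Int.toStr (PySem.Int.mod i 256)) ∘ (Nat.cast : Nat → Int) =
        (fun k : Nat => pvGD (k/256) (k%256)) := by
      funext k; simp only [Function.comp, pvFd256, pvMod256]; rfl
    rw [hfun]
    have hcast : ((m : Int)).toNat = m := by omega
    have hc256 : ((256:Int)).toNat = 256 := rfl
    have hcd : (((m/256 : Nat) : Int)).toNat = m/256 := by omega
    have hcm : (((m%256 : Nat) : Int)).toNat = m%256 := by omega
    rw [hcast, hcd, hcm, hc256, pvGDcore]
    simp only [List.map_map]
    rfl
  · rw [if_neg h]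
    have : db = 0 := by
      rw [hdb]; rw [ht2] at h
      by_cases hc : T - min 10 T > 0
      · rw [if_pos hc] at h; omega
      · rw [if_neg hc] at h; omega
    rw [this, show PySem.Int.floordiv 0 256 = 0 by decide, show PySem.Int.mod 0 256 = 0 by decide]
    simp [pvPyRangeZero]


theorem pvTriple (T : Int) :
    (if (if (if T - min 10 T > 0 then T - min 10 T - min 256 (T - min 10 T) else T - min 10 T) > 0 then
           (if T - min 10 T > 0 then T - min 10 T - min 256 (T - min 10 T) else T - min 10 T)
             - min 65536 (if T - min 10 T > 0 then T - min 10 T - min 256 (T - min 10 T) else T - min 10 T)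
         else (if T - min 10 T > 0 then T - min 10 T - min 256 (T - min 10 T) else T - min 10 T)) > 0 then
      (PySem.List.pyRange 0 (if (if T - min 10 T > 0 then T - min 10 T - min 256 (T - min 10 T) else T - min 10 T) > 0 then
           (if T - min 10 T > 0 then T - min 10 T - min 256 (T - min 10 T) else T - min 10 T)
             - min 65536 (if T - min 10 T > 0 then T - min 10 T - min 256 (T - min 10 T) else T - min 10 T)
         else (if T - min 10 T > 0 then T - min 10 T - min 256 (T - min 10 T) else T - min 10 T)) 1).map
        (fun i => "L1 " ++ PySem.Int.toStr (PySem.Int.floordiv i 65536)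
          ++ ", L2 " ++ PySem.Int.toStr (PySem.Int.mod (PySem.Int.floordiv i 256) 256)
          ++ ", L3 " ++ PySem.Int.toStr (PySem.Int.mod i 256))
     else []) =
    ((PySem.List.pyRange 0 (PySem.Int.floordiv (max 0 (T - 10 - 256 - 65536)) 65536) 1).flatMap (fun l1 =>
        (PySem.List.pyRange 0 256 1).flatMap (fun l2 =>
          (PySem.List.pyRange 0 256 1).map (fun l3 => pvTriLine l1 l2 l3)))
      ++ ((PySem.List.pyRange 0 (PySem.Int.floordiv (PySem.Int.mod (max 0 (T - 10 - 256 - 65536)) 65536) 256) 1).flatMap (fun l2 =>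
          (PySem.List.pyRange 0 256 1).map (fun l3 => pvTriLine (PySem.Int.floordiv (max 0 (T - 10 - 256 - 65536)) 65536) l2 l3))
      ++ (PySem.List.pyRange 0 (PySem.Int.mod (PySem.Int.mod (max 0 (T - 10 - 256 - 65536)) 65536) 256) 1).map (fun l3 =>
          pvTriLine (PySem.Int.floordiv (max 0 (T - 10 - 256 - 65536)) 65536) (PySem.Int.floordiv (PySem.Int.mod (max 0 (T - 10 - 256 - 65536)) 65536) 256) l3))) := by
  set t2 := (if T - min 10 T > 0 then T - min 10 T - min 256 (T - min 10 T) else T - min 10 T) with ht2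
  set t3 := (if t2 > 0 then t2 - min 65536 t2 else t2) with ht3
  set t := max 0 (T - 10 - 256 - 65536) with ht
  have ht2' : (T ≤ 10 → t2 = T - min 10 T) ∧ (T > 10 → t2 = T - 10 - min 256 (T - 10)) := by
    constructor <;> intro hc
    · rw [ht2, if_neg (by omega)]
    · rw [ht2, if_pos (by omega), show min 10 T = 10 by omega]
  have ht3' : t3 ≤ 0 ∨ (t3 = t2 - 65536 ∧ t2 > 65536) := by
    rw [ht3]
    by_cases hc : t2 > 0
    · rw [if_pos hc]; omega
    · rw [if_neg hc]; omega
  by_cases h : t3 > 0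
  · rw [if_pos h]
    have htv : t = t3 := by
      rcases ht3' with h1 | ⟨h1, h2⟩
      · omega
      · rw [ht, h1]
        rcases ht2' with ⟨ha, hb⟩
        by_cases hc : T ≤ 10
        · have := ha hc; omega
        · have := hb (by omega); omega
    have hm : t = ((t.toNat : Nat) : Int) := by omega
    set m := t.toNat with hmdef
    rw [← htv, hm, pvFd65536, pvMod65536, pvFd256, pvMod256]
    have hc256 : ((256:Int)).toNat = 256 := rfl
    simp only [pvPyRangeZero, List.flatMap_map, List.map_map, Int.toNat_natCast, hc256]
    have hfun : (fun i => "L1 " ++ PySem.Int.toStr (PySem.Int.floordiv i 65536)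
          ++ ", L2 " ++ PySem.Int.toStr (PySem.Int.mod (PySem.Int.floordiv i 256) 256)
          ++ ", L3 " ++ PySem.Int.toStr (PySem.Int.mod i 256)) ∘ (Nat.cast : Nat → Int) =
        (fun k : Nat => pvGT (k/65536) (k/256%256) (k%256)) := by
      funext k
      simp only [Function.comp, pvFd65536, pvFd256, pvMod256]
      rfl
    rw [hfun, pvGTcore]
    rfl
  · rw [if_neg h]
    have ht0 : t = 0 := by
      rcases ht3' with h1 | ⟨h1, h2⟩
      · rcases ht2' with ⟨ha, hb⟩
        rw [ht]
        by_cases hc : T ≤ 10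
        · have := ha hc; rw [ht3] at h1
          by_cases hd : t2 > 0
          · rw [if_pos hd] at h1; omega
          · omega
        · have := hb (by omega)
          rw [ht3] at h1
          by_cases hd : t2 > 0
          · rw [if_pos hd] at h1; omega
          · omega
      · omega
    rw [ht0, show PySem.Int.floordiv 0 65536 = 0 by decide, show PySem.Int.mod 0 65536 = 0 by decide,
        show PySem.Int.floordiv 0 256 = 0 by decide, show PySem.Int.mod 0 256 = 0 by decide]
    simp [pvPyRangeZero]

-- ===== VERDICT (by name: the statement is the Claim_ definition above) =====
theorem calculate_blocks_spec : Claim_equal_calculate_blocks := by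
  intro fs _
  unfold Spec_calculate_blocks
  simp only [calculate_blocks, calculate_blocks_alt]
  rw [show PySem.Int.floordiv pvSINGLE_INDIRECT_CAPACITY pvBLOCK_SIZE = 256 by decide,
      show PySem.Int.floordiv pvDOUBLE_INDIRECT_CAPACITY pvBLOCK_SIZE = 65536 by decide,
      show PySem.Int.floordiv pvBLOCK_SIZE pvPOINTER_SIZE = 256 by decide,
      show pvN = (256:Int) by decide,
      show pvNUM_DIRECT_BLOCKS = (10:Int) from rfl,
      show ((256:Int))^2 = 65536 by norm_num,
      show ((256:Int))*256 = 65536 by norm_num]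
  generalize PySem.Int.floordiv (fs + pvBLOCK_SIZE - 1) pvBLOCK_SIZE = T
  simp only [List.cons.injEq, Prod.mk.injEq, true_and, and_true]
  exact ⟨pvDirect T, pvSingle T, pvDouble T, pvTriple T⟩
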